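-- pv_equiv track=rewrite | github.com/Mxy0331/AviNP-seq | Pollution_analysis/code/length_static.py | categorize_lengths
-- ===== SOURCE A (Python) =====
-- from collections import defaultdict
--
-- def categorize_lengths(lengths):
--     categorized = defaultdict(int)
--     for seq_len, count in lengths.items():
--         # 根据要求的长度区间分组
--         if seq_len <= 150:
--             category = "0-150"
--         elif seq_len <= 300:
--             category = "151-300"
--         elif seq_len <= 450:
--             category = "301-450"
--         elif seq_len <= 600:
--             category = "451-600"
--         elif seq_len <= 750:
--             category = "601-750"
--         elif seq_len <= 900:
--             category = "751-900"
--         elif seq_len <= 1050: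
--             category = "901-1050"
--         elif seq_len <= 1200:
--             category = "1051-1200"
--         elif seq_len <= 1350:
--             category = "1201-1350"
--         elif seq_len <= 1500:
--             category = "1351-1500"
--         elif seq_len <= 1650:
--             category = "1501-1650"
--         elif seq_len <= 1800:
--             category = "1651-1800"
--         elif seq_len <= 1950:
--             category = "1801-1950"
--         elif seq_len <= 2100:
--             category = "1951-2100"
--         elif seq_len <= 2250:
--             category = "2101-2250"
--         elif seq_len <= 2400:
--             category = "2251-2400"
--         elif seq_len <= 2500:
--             category = "2401-2500"
--         else:
--             category = ">2500"
--
--         categorized[category] += count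
--
--     return categorized
-- ===== SOURCE B (Python) =====
-- from collections import defaultdict
--
-- def categorize_lengths(lengths):
--     # Stage 1: aggregate counts per numeric bucket index computed arithmetically
--     # (floor division by the bucket width), no comparison chain over the labels.
--     totals = defaultdict(int)
--     for seq_len, count in lengths.items():
--         if seq_len > 2500:
--             idx = 17
--         elif seq_len > 2400:
--             idx = 16
--         else:
--             idx = max((seq_len - 1) // 150, 0)
--         totals[idx] += count
--     # Stage 2: render the bucket indices into range labels (first-seen order kept).
--     categorized = defaultdict(int)
--     for idx, total in totals.items():
--         if idx == 0:
--             label = "0-150"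
--         elif idx == 16:
--             label = "2401-2500"
--         elif idx == 17:
--             label = ">2500"
--         else:
--             label = "%d-%d" % (150 * idx + 1, 150 * (idx + 1))
--         categorized[label] = total
--     return categorized
-- ===== Notes on version B (the rewrite author's own statement) =====
-- stated objective: alternative
-- what changed: Replaced A's single pass with an 18-branch if/elif label chain by a two-stage pipeline: first aggregate counts per numeric bucket index computed arithmetically (max((seq_len-1)//150,0), with two overflow buckets), then a second pass renders the indices into range labels generated by %-formatting.
import Mathlib
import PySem

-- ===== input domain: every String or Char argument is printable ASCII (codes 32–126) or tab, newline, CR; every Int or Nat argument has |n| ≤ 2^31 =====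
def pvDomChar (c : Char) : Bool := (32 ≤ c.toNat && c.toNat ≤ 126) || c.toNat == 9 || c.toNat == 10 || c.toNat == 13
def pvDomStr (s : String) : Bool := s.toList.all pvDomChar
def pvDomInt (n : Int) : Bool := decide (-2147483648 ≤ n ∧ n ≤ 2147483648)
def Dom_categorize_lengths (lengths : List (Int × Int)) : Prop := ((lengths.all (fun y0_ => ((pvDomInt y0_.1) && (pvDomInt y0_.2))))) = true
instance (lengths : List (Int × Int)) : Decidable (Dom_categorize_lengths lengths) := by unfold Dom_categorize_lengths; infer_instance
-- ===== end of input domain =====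

-- B replaces A's one pass with an 18-branch if/elif label chain by two stages: aggregate
-- counts per numeric bucket index computed by floor division, then render the indices
-- into generated range labels (alternative; same O(n) cost).

-- ===== PORT A =====
-- the if/elif chain of A, step for step
def pvCatA (seq_len : Int) : String :=
  if seq_len ≤ 150 then "0-150"
  else if seq_len ≤ 300 then "151-300"
  else if seq_len ≤ 450 then "301-450"
  else if seq_len ≤ 600 then "451-600"
  else if seq_len ≤ 750 then "601-750"
  else if seq_len ≤ 900 then "751-900"
  else if seq_len ≤ 1050 then "901-1050"
  else if seq_len ≤ 1200 then "1051-1200"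
  else if seq_len ≤ 1350 then "1201-1350"
  else if seq_len ≤ 1500 then "1351-1500"
  else if seq_len ≤ 1650 then "1501-1650"
  else if seq_len ≤ 1800 then "1651-1800"
  else if seq_len ≤ 1950 then "1801-1950"
  else if seq_len ≤ 2100 then "1951-2100"
  else if seq_len ≤ 2250 then "2101-2250"
  else if seq_len ≤ 2400 then "2251-2400"
  else if seq_len ≤ 2500 then "2401-2500"
  else ">2500"

def categorize_lengths (lengths : List (Int × Int)) : List (String × Int) :=
  (lengths.foldl
    (fun (d : PySem.Dict String Int) p =>
      d.modify (pvCatA p.1) 0 (· + p.2))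
    PySem.Dict.empty).items

-- ===== PORT B =====
-- bucket index of a length: arithmetic (max((seq_len - 1) // 150, 0)), not a label chain
def pvIdxB (seq_len : Int) : Int :=
  if 2500 < seq_len then 17
  else if 2400 < seq_len then 16
  else max (PySem.Int.floordiv (seq_len - 1) 150) 0

-- label of a bucket index ("%d-%d" % (150*i+1, 150*(i+1)) in the generic case)
def pvLabelB (i : Int) : String :=
  if i = 0 then "0-150"
  else if i = 16 then "2401-2500"
  else if i = 17 then ">2500"
  else PySem.Str.join "-" [PySem.Int.toStr (150 * i + 1), PySem.Int.toStr (150 * (i + 1))]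

def categorize_lengths_alt (lengths : List (Int × Int)) : List (String × Int) :=
  let totals := lengths.foldl
    (fun (d : PySem.Dict Int Int) p => d.modify (pvIdxB p.1) 0 (· + p.2))
    PySem.Dict.empty
  (totals.items.foldl
    (fun (d : PySem.Dict String Int) q => d.insert (pvLabelB q.1) q.2)
    PySem.Dict.empty).items

-- ===== PRECONDITION & SPEC =====
def Spec_categorize_lengths (lengths : List (Int × Int)) (out : List (String × Int)) : Prop := out = categorize_lengths_alt lengths
instance (lengths : List (Int × Int)) (out : List (String × Int)) : Decidable (Spec_categorize_lengths lengths out) := by unfold Spec_categorize_lengths; infer_instance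

-- ===== CLAIM (what is proved, stated in full; the proofs are below) =====
def Claim_equal_categorize_lengths : Prop := ∀ (lengths : List (Int × Int)), Dom_categorize_lengths lengths → Spec_categorize_lengths lengths (categorize_lengths lengths)

-- ===== LEMMAS AND PROOFS =====

-- the key/value renaming the proofs track: an Int-keyed item becomes its labelled item
def pvFmap : Int × Int → String × Int := fun p => (pvLabelB p.1, p.2)

-- pvLabelB is injective on bucket indices 0..17
theorem pvInj (i j : Int) (hi : 0 ≤ i ∧ i ≤ 17) (hj : 0 ≤ j ∧ j ≤ 17)
    (h : pvLabelB i = pvLabelB j) : i = j := by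
  have key : ∀ a b : Fin 18, pvLabelB a.val = pvLabelB b.val → a = b := by decide
  have hi' : ((i.toNat : Nat) : Int) = i := Int.toNat_of_nonneg hi.1
  have hj' : ((j.toNat : Nat) : Int) = j := Int.toNat_of_nonneg hj.1
  have h2 := key ⟨i.toNat, by omega⟩ ⟨j.toNat, by omega⟩ (by simpa [hi', hj'] using h)
  have := congrArg Fin.val h2
  simp only [] at this
  omega

-- every bucket index is in 0..17
theorem pvIdx_range (x : Int) : 0 ≤ pvIdxB x ∧ pvIdxB x ≤ 17 := by
  unfold pvIdxB
  split_ifs with h1 h2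
  · omega
  · omega
  · have : PySem.Int.floordiv (x - 1) 150 < 16 := by
      rw [PySem.Int.floordiv_lt_iff_lt_mul (by omega)]
      omega
    omega

theorem pvIdx_eq_zero (x : Int) (h : x ≤ 150) : pvIdxB x = 0 := by
  unfold pvIdxB
  rw [if_neg (by omega), if_neg (by omega)]
  have : PySem.Int.floordiv (x - 1) 150 < 1 := by
    rw [PySem.Int.floordiv_lt_iff_lt_mul (by omega)]
    omega
  omega

theorem pvIdx_eq_of (x k : Int) (hk : 0 ≤ k) (h1 : 150 * k < x) (h2 : x ≤ 150 * (k + 1))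
    (hx : x ≤ 2400) : pvIdxB x = k := by
  unfold pvIdxB
  rw [if_neg (by omega), if_neg (by omega)]
  have : PySem.Int.floordiv (x - 1) 150 = k := by
    rw [PySem.Int.floordiv_eq_iff_of_pos (by omega)]
    omega
  omega

-- the composite labelling agrees with A's chain
theorem pvCat_eq (x : Int) : pvLabelB (pvIdxB x) = pvCatA x := by
  unfold pvCatA
  by_cases h0 : x ≤ 150
  · rw [if_pos h0, pvIdx_eq_zero x h0]; decide
  rw [if_neg h0]
  by_cases h1 : x ≤ 300
  · rw [if_pos h1, pvIdx_eq_of x 1 (by omega) (by omega) (by omega) (by omega)]; decide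
  rw [if_neg h1]
  by_cases h2 : x ≤ 450
  · rw [if_pos h2, pvIdx_eq_of x 2 (by omega) (by omega) (by omega) (by omega)]; decide
  rw [if_neg h2]
  by_cases h3 : x ≤ 600
  · rw [if_pos h3, pvIdx_eq_of x 3 (by omega) (by omega) (by omega) (by omega)]; decide
  rw [if_neg h3]
  by_cases h4 : x ≤ 750
  · rw [if_pos h4, pvIdx_eq_of x 4 (by omega) (by omega) (by omega) (by omega)]; decide
  rw [if_neg h4]
  by_cases h5 : x ≤ 900
  · rw [if_pos h5, pvIdx_eq_of x 5 (by omega) (by omega) (by omega) (by omega)]; decide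
  rw [if_neg h5]
  by_cases h6 : x ≤ 1050
  · rw [if_pos h6, pvIdx_eq_of x 6 (by omega) (by omega) (by omega) (by omega)]; decide
  rw [if_neg h6]
  by_cases h7 : x ≤ 1200
  · rw [if_pos h7, pvIdx_eq_of x 7 (by omega) (by omega) (by omega) (by omega)]; decide
  rw [if_neg h7]
  by_cases h8 : x ≤ 1350
  · rw [if_pos h8, pvIdx_eq_of x 8 (by omega) (by omega) (by omega) (by omega)]; decide
  rw [if_neg h8]
  by_cases h9 : x ≤ 1500
  · rw [if_pos h9, pvIdx_eq_of x 9 (by omega) (by omega) (by omega) (by omega)]; decide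
  rw [if_neg h9]
  by_cases h10 : x ≤ 1650
  · rw [if_pos h10, pvIdx_eq_of x 10 (by omega) (by omega) (by omega) (by omega)]; decide
  rw [if_neg h10]
  by_cases h11 : x ≤ 1800
  · rw [if_pos h11, pvIdx_eq_of x 11 (by omega) (by omega) (by omega) (by omega)]; decide
  rw [if_neg h11]
  by_cases h12 : x ≤ 1950
  · rw [if_pos h12, pvIdx_eq_of x 12 (by omega) (by omega) (by omega) (by omega)]; decide
  rw [if_neg h12]
  by_cases h13 : x ≤ 2100
  · rw [if_pos h13, pvIdx_eq_of x 13 (by omega) (by omega) (by omega) (by omega)]; decide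
  rw [if_neg h13]
  by_cases h14 : x ≤ 2250
  · rw [if_pos h14, pvIdx_eq_of x 14 (by omega) (by omega) (by omega) (by omega)]; decide
  rw [if_neg h14]
  by_cases h15 : x ≤ 2400
  · rw [if_pos h15, pvIdx_eq_of x 15 (by omega) (by omega) (by omega) (by omega)]; decide
  rw [if_neg h15]
  by_cases h16 : x ≤ 2500
  · rw [if_pos h16, show pvIdxB x = 16 from by unfold pvIdxB; rw [if_neg (by omega), if_pos (by omega)]]
    decide
  rw [if_neg h16, show pvIdxB x = 17 from by unfold pvIdxB; rw [if_pos (by omega)]]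
  decide

theorem pvKeys_mk_map (d : PySem.Dict Int Int) :
    (PySem.Dict.mk (d.items.map pvFmap)).keys = d.keys.map pvLabelB := by
  simp [PySem.Dict.keys, List.map_map, pvFmap]

theorem pvNodup_mk_map (d : PySem.Dict Int Int) (hnd : d.keys.Nodup)
    (hk : ∀ k ∈ d.keys, 0 ≤ k ∧ k ≤ 17) :
    (PySem.Dict.mk (d.items.map pvFmap)).keys.Nodup := by
  rw [pvKeys_mk_map]
  exact List.Nodup.map_on (fun a ha b hb he => pvInj a b (hk a ha) (hk b hb) he) hnd

theorem pvContains_mk_map (d : PySem.Dict Int Int) (hk : ∀ k ∈ d.keys, 0 ≤ k ∧ k ≤ 17)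
    (i : Int) (hi : 0 ≤ i ∧ i ≤ 17) :
    (PySem.Dict.mk (d.items.map pvFmap)).contains (pvLabelB i) = d.contains i := by
  rw [PySem.Dict.contains_eq_decide_mem_keys, PySem.Dict.contains_eq_decide_mem_keys,
    pvKeys_mk_map]
  simp only [decide_eq_decide]
  constructor
  · intro h
    obtain ⟨k, hkm, he⟩ := List.mem_map.mp h
    exact pvInj k i (hk k hkm) hi he ▸ hkm
  · exact fun h => List.mem_map_of_mem h

theorem pvGetD_mk_map (d : PySem.Dict Int Int) (hnd : d.keys.Nodup)
    (hk : ∀ k ∈ d.keys, 0 ≤ k ∧ k ≤ 17) (i : Int) (hi : 0 ≤ i ∧ i ≤ 17) :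
    (PySem.Dict.mk (d.items.map pvFmap)).getD (pvLabelB i) 0 = d.getD i 0 := by
  by_cases hc : d.contains i = true
  · have hmem : i ∈ d.keys := (PySem.Dict.contains_iff_mem_keys d i).mp hc
    obtain ⟨⟨k0, v0⟩, hp, hfst⟩ : ∃ p ∈ d.items, p.1 = i := by
      simpa [PySem.Dict.keys] using hmem
    dsimp only at hfst
    subst hfst
    have h2 : (pvLabelB k0, v0) ∈ d.items.map pvFmap := by
      simpa [pvFmap] using List.mem_map_of_mem (f := pvFmap) hp
    rw [PySem.Dict.getD_of_mem_items _ h2 (pvNodup_mk_map d hnd hk) 0,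
        PySem.Dict.getD_of_mem_items _ hp hnd 0]
  · have hc' : d.contains i = false := by simpa using hc
    rw [PySem.Dict.getD_of_not_contains _ 0 hc',
        PySem.Dict.getD_of_not_contains _ 0 (by rw [pvContains_mk_map d hk i hi]; exact hc')]

theorem pvItems_insert_map (d : PySem.Dict Int Int) (hk : ∀ k ∈ d.keys, 0 ≤ k ∧ k ≤ 17)
    (i v : Int) (hi : 0 ≤ i ∧ i ≤ 17) :
    ((PySem.Dict.mk (d.items.map pvFmap)).insert (pvLabelB i) v).items
      = ((d.insert i v).items).map pvFmap := by
  rw [PySem.Dict.items_insert, PySem.Dict.items_insert, pvContains_mk_map d hk i hi]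
  by_cases hc : d.contains i = true
  · rw [if_pos hc, if_pos hc]
    show (d.items.map pvFmap).map _ = _
    rw [List.map_map, List.map_map]
    apply List.map_congr_left
    intro p hp
    have hpk : p.1 ∈ d.keys := by
      simp only [PySem.Dict.keys]
      exact List.mem_map_of_mem hp
    by_cases hpi : p.1 = i
    · simp [Function.comp, pvFmap, hpi]
    · have hne : ¬ pvLabelB p.1 = pvLabelB i :=
        fun he => hpi (pvInj p.1 i (hk _ hpk) hi he)
      simp [Function.comp, pvFmap, hpi, hne]
  · rw [if_neg hc, if_neg hc]
    show d.items.map pvFmap ++ [(pvLabelB i, v)] = (d.items ++ [(i, v)]).map pvFmap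
    simp [pvFmap]

-- the two counting folds stay in lock-step through the key/value renaming
theorem pvMain (xs : List (Int × Int)) : ∀ (d : PySem.Dict Int Int), d.keys.Nodup →
    (∀ k ∈ d.keys, 0 ≤ k ∧ k ≤ 17) →
    (xs.foldl (fun D p => D.modify (pvCatA p.1) 0 (· + p.2)) (PySem.Dict.mk (d.items.map pvFmap))).items
      = ((xs.foldl (fun D p => D.modify (pvIdxB p.1) 0 (· + p.2)) d)).items.map pvFmap := by
  induction xs with
  | nil => intro d _ _; rfl
  | cons p xs ih =>
    intro d hnd hk
    simp only [List.foldl_cons]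
    have hi := pvIdx_range p.1
    have e1 : (PySem.Dict.mk (d.items.map pvFmap)).modify (pvCatA p.1) 0 (· + p.2)
        = PySem.Dict.mk (((d.modify (pvIdxB p.1) 0 (· + p.2)).items).map pvFmap) := by
      rw [← pvCat_eq p.1]
      apply PySem.Dict.ext
      show ((PySem.Dict.mk (d.items.map pvFmap)).insert (pvLabelB (pvIdxB p.1))
          ((PySem.Dict.mk (d.items.map pvFmap)).getD (pvLabelB (pvIdxB p.1)) 0 + p.2)).items = _
      rw [pvGetD_mk_map d hnd hk _ hi, pvItems_insert_map d hk _ _ hi]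
      rfl
    rw [e1]
    apply ih
    · show (d.insert (pvIdxB p.1) _).keys.Nodup
      exact PySem.Dict.nodup_keys_insert _ _ _ hnd
    · intro k hkm
      rcases (PySem.Dict.mem_keys_insert _ _ _ _).mp hkm with h | h
      · exact h ▸ hi
      · exact hk k h

-- keys of the index-count fold stay in 0..17
theorem pvRange_fold (xs : List (Int × Int)) : ∀ (d : PySem.Dict Int Int),
    (∀ k ∈ d.keys, 0 ≤ k ∧ k ≤ 17) →
    ∀ k ∈ (xs.foldl (fun D p => D.modify (pvIdxB p.1) 0 (· + p.2)) d).keys, 0 ≤ k ∧ k ≤ 17 := by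
  induction xs with
  | nil => intro d hd; exact hd
  | cons p xs ih =>
    intro d hd
    simp only [List.foldl_cons]
    apply ih
    intro k hkm
    rcases (PySem.Dict.mem_keys_insert _ _ _ _).mp hkm with h | h
    · exact h ▸ pvIdx_range p.1
    · exact hd k h

theorem pvNodup_fold (xs : List (Int × Int)) : ∀ (d : PySem.Dict Int Int), d.keys.Nodup →
    (xs.foldl (fun D p => D.modify (pvIdxB p.1) 0 (· + p.2)) d).keys.Nodup := by
  induction xs with
  | nil => intro d hd; exact hd
  | cons p xs ih =>
    intro d hd
    simp only [List.foldl_cons]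
    exact ih _ (PySem.Dict.nodup_keys_insert _ _ _ hd)

-- the rendering pass over the bucket dict is a plain map of its items
theorem pvStage2 (t : PySem.Dict Int Int) (hnd : t.keys.Nodup)
    (hk : ∀ k ∈ t.keys, 0 ≤ k ∧ k ≤ 17) :
    (t.items.foldl (fun (d : PySem.Dict String Int) q => d.insert (pvLabelB q.1) q.2)
        PySem.Dict.empty).items = t.items.map pvFmap := by
  have h1 : ∀ a ∈ t.items, (PySem.Dict.empty : PySem.Dict String Int).contains (pvLabelB a.1) = false := by
    intro a _
    exact PySem.Dict.contains_empty _
  have h2 : (t.items.map (fun q => pvLabelB q.1)).Nodup := by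
    have he : t.items.map (fun q => pvLabelB q.1) = t.keys.map pvLabelB := by
      simp [PySem.Dict.keys, List.map_map]
    rw [he]
    exact List.Nodup.map_on (fun a ha b hb hab => pvInj a b (hk a ha) (hk b hb) hab) hnd
  have := PySem.Dict.items_foldl_insert_fresh (l := t.items) (k := fun q => pvLabelB q.1)
    (v := fun q => q.2) (d := PySem.Dict.empty) h1 h2
  simpa [pvFmap] using this

-- ===== VERDICT (by name: the statement is the Claim_ definition above) =====
theorem categorize_lengths_spec : Claim_equal_categorize_lengths := by
  intro lengths _
  unfold Spec_categorize_lengths categorize_lengths categorize_lengths_alt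
  have hndE : (PySem.Dict.empty : PySem.Dict Int Int).keys.Nodup := PySem.Dict.nodup_keys_empty
  have hkE : ∀ k ∈ (PySem.Dict.empty : PySem.Dict Int Int).keys, 0 ≤ k ∧ k ≤ 17 := by
    intro k hk
    simp [PySem.Dict.keys_empty] at hk
  rw [pvStage2 _ (pvNodup_fold lengths _ hndE) (pvRange_fold lengths _ hkE)]
  exact pvMain lengths PySem.Dict.empty hndE hkE
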